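-- pv_equiv track=rewrite | github.com/marvin-junyuanbags/blackbackpack.github.io | fixed_article_optimizer.py | _determine_article_type
-- ===== SOURCE A (Python) =====
-- def _determine_article_type(content, filename):
--     """Determine article type based on content and filename"""
--     content_lower = content.lower()
--     filename_lower = filename.lower()
--
--     # Check filename first for more accurate detection
--     if any(term in filename_lower for term in ['golf', 'caddie', 'course']):
--         return 'golf'
--     elif any(term in filename_lower for term in ['bogg', 'beach', 'tote']):
--         return 'bogg'
--     elif any(term in filename_lower for term in ['factory', 'manufacturing', 'supplier', 'production']):
--         return 'factory'
--
--     # Then check content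
--     if any(term in content_lower for term in ['golf bag', 'golf course', 'caddie', 'golf equipment']):
--         return 'golf'
--     elif any(term in content_lower for term in ['bogg bag', 'beach bag', 'tote bag', 'eva foam']):
--         return 'bogg'
--     elif any(term in content_lower for term in ['factory', 'manufacturing', 'supplier', 'production', 'oem', 'odm']):
--         return 'factory'
--     else:
--         return 'general'
-- ===== SOURCE B (Python) =====
-- FNAME_TERMS = {'golf': 0, 'caddie': 0, 'course': 0,
--                'bogg': 1, 'beach': 1, 'tote': 1,
--                'factory': 2, 'manufacturing': 2, 'supplier': 2, 'production': 2}
-- CONTENT_TERMS = {'golf bag': 0, 'golf course': 0, 'caddie': 0, 'golf equipment': 0,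
--                  'bogg bag': 1, 'beach bag': 1, 'tote bag': 1, 'eva foam': 1,
--                  'factory': 2, 'manufacturing': 2, 'supplier': 2, 'production': 2,
--                  'oem': 2, 'odm': 2}
-- TYPES = ['golf', 'bogg', 'factory']
--
--
-- def _determine_article_type(content, filename):
--     """Collect the priority of EVERY matching keyword and return the type of the
--     minimum priority found (filename hits outrank content hits)."""
--     fl = filename.lower()
--     cl = content.lower()
--     hits = [p for term, p in FNAME_TERMS.items() if term in fl] \
--         or [p for term, p in CONTENT_TERMS.items() if term in cl]
--     return TYPES[min(hits)] if hits else 'general'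
-- ===== Notes on version B (the rewrite author's own statement) =====
-- stated objective: alternative
-- what changed: Instead of A's six-branch if/elif chain of any() tests, B maps every keyword to a numeric priority (term->priority dicts), exhaustively collects the priorities of ALL matching keywords (filename terms, falling back to content terms only when no filename term matches), and returns the type of the minimum priority collected.
import Mathlib
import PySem

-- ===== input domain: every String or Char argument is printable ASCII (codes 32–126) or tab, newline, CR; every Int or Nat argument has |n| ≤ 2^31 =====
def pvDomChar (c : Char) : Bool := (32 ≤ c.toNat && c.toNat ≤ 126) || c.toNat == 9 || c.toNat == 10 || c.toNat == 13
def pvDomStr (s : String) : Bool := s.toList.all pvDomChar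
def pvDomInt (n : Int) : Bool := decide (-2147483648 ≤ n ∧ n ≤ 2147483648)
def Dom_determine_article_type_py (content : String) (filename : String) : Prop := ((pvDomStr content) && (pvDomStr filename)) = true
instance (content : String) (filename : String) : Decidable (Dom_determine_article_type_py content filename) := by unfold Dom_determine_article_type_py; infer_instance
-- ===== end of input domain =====

-- B replaces A's six hardcoded if/elif branches by an exhaustive keyword scan: every matching term contributes its priority and the type of the MINIMUM priority wins (no short-circuit chain); same return value, similar cost.


-- ===== PORT A =====
def determine_article_type_py (content : String) (filename : String) : String :=
  let content_lower := PySem.Str.lower content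
  let filename_lower := PySem.Str.lower filename
  if (["golf", "caddie", "course"].any fun term => PySem.Str.isIn term filename_lower) then
    "golf"
  else if (["bogg", "beach", "tote"].any fun term => PySem.Str.isIn term filename_lower) then
    "bogg"
  else if (["factory", "manufacturing", "supplier", "production"].any fun term => PySem.Str.isIn term filename_lower) then
    "factory"
  else if (["golf bag", "golf course", "caddie", "golf equipment"].any fun term => PySem.Str.isIn term content_lower) then
    "golf"
  else if (["bogg bag", "beach bag", "tote bag", "eva foam"].any fun term => PySem.Str.isIn term content_lower) then
    "bogg"
  else if (["factory", "manufacturing", "supplier", "production", "oem", "odm"].any fun term => PySem.Str.isIn term content_lower) then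
    "factory"
  else
    "general"

-- ===== PORT B =====
-- module-level dicts FNAME_TERMS / CONTENT_TERMS (term → priority) and the list TYPES from Source B
def pvFnameTerms : List (String × Int) :=
  [("golf", 0), ("caddie", 0), ("course", 0),
   ("bogg", 1), ("beach", 1), ("tote", 1),
   ("factory", 2), ("manufacturing", 2), ("supplier", 2), ("production", 2)]
def pvContentTerms : List (String × Int) :=
  [("golf bag", 0), ("golf course", 0), ("caddie", 0), ("golf equipment", 0),
   ("bogg bag", 1), ("beach bag", 1), ("tote bag", 1), ("eva foam", 1),
   ("factory", 2), ("manufacturing", 2), ("supplier", 2), ("production", 2),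
   ("oem", 2), ("odm", 2)]
def pvTypes : List String := ["golf", "bogg", "factory"]

def determine_article_type_py_alt (content : String) (filename : String) : String :=
  let fl := PySem.Str.lower filename
  let cl := PySem.Str.lower content
  let fhits := (pvFnameTerms.filter (fun p => PySem.Str.isIn p.1 fl)).map (fun p => p.2)
  let hits := if fhits = [] then (pvContentTerms.filter (fun p => PySem.Str.isIn p.1 cl)).map (fun p => p.2) else fhits
  if hits = [] then "general"
  else
    match PySem.List.min? hits (fun x => x) with
    | some m => (PySem.List.pyGet? pvTypes m).getD "general"
    | none => "general"

-- ===== PRECONDITION & SPEC =====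
def Spec_determine_article_type_py (content : String) (filename : String) (out : String) : Prop := out = determine_article_type_py_alt content filename
instance (content : String) (filename : String) (out : String) : Decidable (Spec_determine_article_type_py content filename out) := by unfold Spec_determine_article_type_py; infer_instance

-- ===== CLAIM (what is proved, stated in full; the proofs are below) =====
def Claim_equal_determine_article_type_py : Prop := ∀ (content : String) (filename : String), Dom_determine_article_type_py content filename → Spec_determine_article_type_py content filename (determine_article_type_py content filename)

-- ===== LEMMAS AND PROOFS =====

lemma pv_group_hits (fl : String) (k : Int) (ts : List String) :
    (((ts.map (fun t => (t, k))).filter (fun p => PySem.Str.isIn p.1 fl)).map (fun p => p.2))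
      = List.replicate (ts.countP (fun t => PySem.Str.isIn t fl)) k := by
  induction ts with
  | nil => rfl
  | cons a t ih =>
      simp only [List.map_cons, List.filter_cons, List.countP_cons]
      by_cases hc : PySem.Str.isIn a fl = true
      · simp only [hc, if_true, List.map_cons, ih, List.replicate_succ, Nat.add_one]
      · simp only [Bool.not_eq_true] at hc
        simp only [hc, Bool.false_eq_true, if_false, ih, Nat.add_zero]

lemma pv_stage (fl : String) (G Bo F : List String) :
    (((G.map (fun t => (t,(0:Int))) ++ Bo.map (fun t => (t,(1:Int))) ++ F.map (fun t => (t,(2:Int)))).filter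
        (fun p => PySem.Str.isIn p.1 fl)).map (fun p => p.2))
      = List.replicate (G.countP (fun t => PySem.Str.isIn t fl)) 0 ++
        List.replicate (Bo.countP (fun t => PySem.Str.isIn t fl)) 1 ++
        List.replicate (F.countP (fun t => PySem.Str.isIn t fl)) 2 := by
  simp only [List.filter_append, List.map_append, pv_group_hits, List.append_assoc]

lemma pv_any_iff_countP (p : String → Bool) (l : List String) :
    l.any p = true ↔ l.countP p ≠ 0 := by
  rw [List.any_eq_true, Ne, List.countP_eq_zero]
  push_neg
  simp

lemma pv_fname_split : pvFnameTerms =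
    (["golf","caddie","course"].map (fun t => (t,(0:Int)))) ++
    (["bogg","beach","tote"].map (fun t => (t,(1:Int)))) ++
    (["factory","manufacturing","supplier","production"].map (fun t => (t,(2:Int)))) := rfl

lemma pv_content_split : pvContentTerms =
    (["golf bag","golf course","caddie","golf equipment"].map (fun t => (t,(0:Int)))) ++
    (["bogg bag","beach bag","tote bag","eva foam"].map (fun t => (t,(1:Int)))) ++
    (["factory","manufacturing","supplier","production","oem","odm"].map (fun t => (t,(2:Int)))) := rfl

lemma pv_min_groups (n0 n1 n2 : Nat) :
    PySem.List.min? (List.replicate n0 (0:Int) ++ List.replicate n1 1 ++ List.replicate n2 2) (fun x => x)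
      = if n0 ≠ 0 then some 0 else if n1 ≠ 0 then some 1 else if n2 ≠ 0 then some 2 else none := by
  set L := List.replicate n0 (0:Int) ++ List.replicate n1 1 ++ List.replicate n2 2 with hL
  have hmemL : ∀ y ∈ L, y = 0 ∨ y = 1 ∨ y = 2 := by
    intro y hy
    simp only [hL, List.mem_append, List.mem_replicate] at hy
    tauto
  cases hm : PySem.List.min? L (fun x => x) with
  | none =>
      have h := (PySem.List.min?_eq_none_iff L (fun x => x)).mp hm
      simp only [hL, List.append_eq_nil_iff, List.replicate_eq_nil_iff] at h
      simp [h.1.1, h.1.2, h.2]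
  | some m =>
      have hmem := PySem.List.min?_mem hm
      have hmin := PySem.List.min?_isMin hm
      have hm012 := hmemL m hmem
      by_cases h0 : n0 = 0
      · by_cases h1 : n1 = 0
        · by_cases h2 : n2 = 0
          · exfalso; simp [hL, h0, h1, h2] at hmem
          · -- only 2s present
            have : m = 2 := by
              have hmem' := hmem
              simp only [hL, h0, h1, List.replicate_zero, List.nil_append,
                List.mem_replicate] at hmem'
              exact hmem'.2
            simp [h0, h1, h2, this]
        · -- no 0s, some 1s: m ≤ 1 and m ∈ {1,2} given no 0s
          have h1mem : (1:Int) ∈ L := by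
            simp [hL, List.mem_replicate]
            omega
          have hle : m ≤ 1 := hmin 1 h1mem
          have hmnot0 : m ≠ 0 := by
            intro h
            have := hmem
            simp [hL, h0, List.mem_replicate, h] at this
          have : m = 1 := by omega
          simp [h0, h1, this]
      · have h0mem : (0:Int) ∈ L := by
          simp [hL, List.mem_replicate]
          omega
        have hle : m ≤ 0 := hmin 0 h0mem
        have : m = 0 := by omega
        simp [h0, this]

lemma pv_stage_result (n0 n1 n2 : Nat) (h : ¬(n0 = 0 ∧ n1 = 0 ∧ n2 = 0)) :
    (match PySem.List.min? (List.replicate n0 (0:Int) ++ List.replicate n1 1 ++ List.replicate n2 2) (fun x => x) with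
     | some m => (PySem.List.pyGet? pvTypes m).getD "general"
     | none => "general")
      = if n0 ≠ 0 then "golf" else if n1 ≠ 0 then "bogg" else "factory" := by
  rw [pv_min_groups]
  by_cases h0 : n0 = 0
  · by_cases h1 : n1 = 0
    · have h2 : n2 ≠ 0 := fun h2 => h ⟨h0, h1, h2⟩
      simp [h0, h1, h2, pvTypes, PySem.List.pyGet?, PySem.List.pyIdx?]
    · simp [h0, h1, pvTypes, PySem.List.pyGet?, PySem.List.pyIdx?]
  · simp [h0, pvTypes, PySem.List.pyGet?, PySem.List.pyIdx?]

lemma pv_main_eq (content filename : String) :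
    determine_article_type_py content filename = determine_article_type_py_alt content filename := by
  unfold determine_article_type_py determine_article_type_py_alt
  simp only [pv_fname_split, pv_content_split, pv_stage, pv_any_iff_countP]
  set n0 := List.countP (fun t => PySem.Str.isIn t (PySem.Str.lower filename)) ["golf","caddie","course"] with hn0
  set n1 := List.countP (fun t => PySem.Str.isIn t (PySem.Str.lower filename)) ["bogg","beach","tote"] with hn1
  set n2 := List.countP (fun t => PySem.Str.isIn t (PySem.Str.lower filename)) ["factory","manufacturing","supplier","production"] with hn2
  set m0 := List.countP (fun t => PySem.Str.isIn t (PySem.Str.lower content)) ["golf bag","golf course","caddie","golf equipment"] with hm0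
  set m1 := List.countP (fun t => PySem.Str.isIn t (PySem.Str.lower content)) ["bogg bag","beach bag","tote bag","eva foam"] with hm1
  set m2 := List.countP (fun t => PySem.Str.isIn t (PySem.Str.lower content)) ["factory","manufacturing","supplier","production","oem","odm"] with hm2
  by_cases hF : (List.replicate n0 (0:Int) ++ List.replicate n1 1 ++ List.replicate n2 2) = []
  · -- no filename keyword matched: A falls through to the content chain, B scans CONTENT_TERMS
    have hz : n0 = 0 ∧ n1 = 0 ∧ n2 = 0 := by
      simpa [List.append_eq_nil_iff, List.replicate_eq_nil_iff] using hF
    rw [if_pos hF]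
    by_cases hC : (List.replicate m0 (0:Int) ++ List.replicate m1 1 ++ List.replicate m2 2) = []
    · have hzc : m0 = 0 ∧ m1 = 0 ∧ m2 = 0 := by
        simpa [List.append_eq_nil_iff, List.replicate_eq_nil_iff] using hC
      rw [if_pos hC]
      simp [hz.1, hz.2.1, hz.2.2, hzc.1, hzc.2.1, hzc.2.2]
    · have hzc : ¬(m0 = 0 ∧ m1 = 0 ∧ m2 = 0) := by
        intro hc; exact hC (by simp [hc.1, hc.2.1, hc.2.2])
      rw [if_neg hC, pv_stage_result m0 m1 m2 hzc]
      by_cases g0 : m0 = 0 <;> by_cases g1 : m1 = 0 <;> by_cases g2 : m2 = 0 <;>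
        simp [hz.1, hz.2.1, hz.2.2, g0, g1, g2] <;>
        exact absurd ⟨g0, g1, g2⟩ hzc
  · -- some filename keyword matched: both sides decide on the filename groups only
    have hz : ¬(n0 = 0 ∧ n1 = 0 ∧ n2 = 0) := by
      intro hc; exact hF (by simp [hc.1, hc.2.1, hc.2.2])
    rw [if_neg hF, if_neg hF, pv_stage_result n0 n1 n2 hz]
    by_cases h0 : n0 = 0 <;> by_cases h1 : n1 = 0 <;> by_cases h2 : n2 = 0 <;>
      simp [h0, h1, h2] <;>
      exact absurd ⟨h0, h1, h2⟩ hz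

-- ===== VERDICT (by name: the statement is the Claim_ definition above) =====
theorem determine_article_type_py_spec : Claim_equal_determine_article_type_py := by
  intro content filename _
  unfold Spec_determine_article_type_py
  exact pv_main_eq content filename
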